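-- pv_equiv track=rewrite | github.com/sathish39893/SiebelAutoUtils | ObjectListGenerator.py | getModifiedInfo
-- ===== SOURCE A (Python) =====
-- def getModifiedInfo(objUpdInfo):
-- 	ObjTypeList ={'Modified':['UPD','UPDATED','UPDATE','EDIT','MODIFIED'],
-- 				'New':['ADD','ADDED','NEW','CREATE','CREATED']
-- 				}
-- 	for k in ObjTypeList:
-- 		if k == objUpdInfo:
-- 			return k
-- 		else:
-- 			for v in ObjTypeList[k]:
-- 				if objUpdInfo.upper() == v:
-- 					return k
-- 	return None
-- ===== SOURCE B (Python) =====
-- _REV = {alias: cat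
--         for cat, aliases in {'Modified': ['UPD', 'UPDATED', 'UPDATE', 'EDIT', 'MODIFIED'],
--                              'New': ['ADD', 'ADDED', 'NEW', 'CREATE', 'CREATED']}.items()
--         for alias in aliases}
--
-- def getModifiedInfo(objUpdInfo):
--     return _REV.get(objUpdInfo.upper())
-- ===== Notes on version B (the rewrite author's own statement) =====
-- stated objective: simpler
-- what changed: Replaces the nested for-loops with exact-key shortcuts by a single precomputed reverse-lookup dict from uppercase alias to category, returning _REV.get(objUpdInfo.upper()); the exact-key 'Modified'/'New' shortcuts are subsumed because their uppercases are already aliases.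
import Mathlib
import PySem

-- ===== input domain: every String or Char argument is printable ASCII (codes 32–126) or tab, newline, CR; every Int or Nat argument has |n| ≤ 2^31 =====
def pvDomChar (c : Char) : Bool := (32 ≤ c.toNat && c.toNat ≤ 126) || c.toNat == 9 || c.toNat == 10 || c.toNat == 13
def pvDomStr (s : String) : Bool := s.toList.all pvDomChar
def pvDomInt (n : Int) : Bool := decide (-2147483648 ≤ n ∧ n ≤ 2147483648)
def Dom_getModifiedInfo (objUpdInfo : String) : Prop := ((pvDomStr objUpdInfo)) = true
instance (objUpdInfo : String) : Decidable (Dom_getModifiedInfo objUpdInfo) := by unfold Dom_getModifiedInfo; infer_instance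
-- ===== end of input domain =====

-- B replaces A's nested scans (with exact-key shortcuts) by one precomputed reverse
-- alias→category lookup table keyed on the uppercased input (simpler).

-- ===== PORT A =====
-- inner 'for v in ObjTypeList[k]: if objUpdInfo.upper() == v: return k'
def pvInnerScan (objUpdInfo : String) (k : String) : List String → Option String
  | [] => none
  | v :: rest =>
    if PySem.Str.upper objUpdInfo = v then some k else pvInnerScan objUpdInfo k rest

def getModifiedInfo (objUpdInfo : String) : Option String :=
  -- k = 'Modified'
  match (if "Modified" = objUpdInfo then some "Modified"
         else pvInnerScan objUpdInfo "Modified" ["UPD","UPDATED","UPDATE","EDIT","MODIFIED"]) with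
  | some r => some r
  | none =>
    -- k = 'New'
    match (if "New" = objUpdInfo then some "New"
           else pvInnerScan objUpdInfo "New" ["ADD","ADDED","NEW","CREATE","CREATED"]) with
    | some r => some r
    | none => none

-- ===== PORT B =====
-- the precomputed reverse dict _REV (alias → category, insertion order)
def pvRev : PySem.Dict String String :=
  PySem.Dict.ofList
    [("UPD","Modified"),("UPDATED","Modified"),("UPDATE","Modified"),("EDIT","Modified"),
     ("MODIFIED","Modified"),
     ("ADD","New"),("ADDED","New"),("NEW","New"),("CREATE","New"),("CREATED","New")]

def getModifiedInfo_alt (objUpdInfo : String) : Option String :=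
  pvRev.get? (PySem.Str.upper objUpdInfo)

-- ===== PRECONDITION & SPEC =====
def Spec_getModifiedInfo (objUpdInfo : String) (out : Option String) : Prop := out = getModifiedInfo_alt objUpdInfo
instance (objUpdInfo : String) (out : Option String) : Decidable (Spec_getModifiedInfo objUpdInfo out) := by unfold Spec_getModifiedInfo; infer_instance

-- ===== CLAIM (what is proved, stated in full; the proofs are below) =====
def Claim_equal_getModifiedInfo : Prop := ∀ (objUpdInfo : String), Dom_getModifiedInfo objUpdInfo → Spec_getModifiedInfo objUpdInfo (getModifiedInfo objUpdInfo)

-- ===== LEMMAS AND PROOFS =====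

theorem pvRev_eq : pvRev = PySem.Dict.mk
    [("UPD","Modified"),("UPDATED","Modified"),("UPDATE","Modified"),("EDIT","Modified"),
     ("MODIFIED","Modified"),
     ("ADD","New"),("ADDED","New"),("NEW","New"),("CREATE","New"),("CREATED","New")] := by decide

-- ===== VERDICT (by name: the statement is the Claim_ definition above) =====
set_option maxHeartbeats 1000000 in
theorem getModifiedInfo_spec : Claim_equal_getModifiedInfo := by
  intro s hd
  clear hd
  unfold Spec_getModifiedInfo getModifiedInfo getModifiedInfo_alt
  rw [pvRev_eq]
  by_cases h1 : "Modified" = s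
  · subst h1; decide
  · by_cases h2 : "New" = s
    · subst h2; decide
    · rw [if_neg h1, if_neg h2]
      simp only [pvInnerScan]
      generalize PySem.Str.upper s = u
      clear h1 h2
      repeat rw [PySem.Dict.get?_mk_cons]
      by_cases e0 : u = "UPD"
      · subst e0; decide
      rw [if_neg e0, if_neg (fun h => e0 (eq_of_beq h).symm)]
      by_cases e1 : u = "UPDATED"
      · subst e1; decide
      rw [if_neg e1, if_neg (fun h => e1 (eq_of_beq h).symm)]
      by_cases e2 : u = "UPDATE"
      · subst e2; decide
      rw [if_neg e2, if_neg (fun h => e2 (eq_of_beq h).symm)]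
      by_cases e3 : u = "EDIT"
      · subst e3; decide
      rw [if_neg e3, if_neg (fun h => e3 (eq_of_beq h).symm)]
      by_cases e4 : u = "MODIFIED"
      · subst e4; decide
      rw [if_neg e4, if_neg (fun h => e4 (eq_of_beq h).symm)]
      by_cases e5 : u = "ADD"
      · subst e5; decide
      rw [if_neg e5, if_neg (fun h => e5 (eq_of_beq h).symm)]
      by_cases e6 : u = "ADDED"
      · subst e6; decide
      rw [if_neg e6, if_neg (fun h => e6 (eq_of_beq h).symm)]
      by_cases e7 : u = "NEW"
      · subst e7; decide
      rw [if_neg e7, if_neg (fun h => e7 (eq_of_beq h).symm)]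
      by_cases e8 : u = "CREATE"
      · subst e8; decide
      rw [if_neg e8, if_neg (fun h => e8 (eq_of_beq h).symm)]
      by_cases e9 : u = "CREATED"
      · subst e9; decide
      rw [if_neg e9, if_neg (fun h => e9 (eq_of_beq h).symm)]
      rfl
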